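-- pv_equiv track=rewrite | github.com/HighW4y2H3ll/binextractor | walk.py | interesting_path
-- ===== SOURCE A (Python) =====
-- file_blacklist = [
--         'makefile', 'copying', 'install-sh', 'configure',
--         'configure.in', 'makefile.in', 'readme', 'changelog',
--         'install', 'todo', 'aclocal.m4', 'authors', 'faq', 'howto',
--         'thanks', 'license', 'kconfig', 'kbuild',
--         ]
--
-- dir_blacklist = ['toolchain', 'tools']
--
-- extension_blacklist = [
--         '.bat', '.c', '.h', '.cpp', '.hpp', '.mak',
--         '.make', '.js', '.xml', '.html', '.htm', '.css', '.svn-base',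
--         '.s', '.txt', '.in', '.asm', '.am', '.log', '.png', '.jpg',
--         '.gif', '.bmp', '.conf', '.texi', '.plo', '.tex', '.man', '.8',
--         '.sgml', '.diff', '.patch', '.txt', '.pdf', '.class', '.jar',
--         ]
--
-- def interesting_path(pstr):
--     flag = False
--     for f in file_blacklist:
--         flag |= (pstr.lower() == f)
--         flag |= pstr.lower().endswith('/'+f)
--     for d in dir_blacklist:
--         flag |= pstr.lower().startswith(d)
--         flag |= ((d+'/') in pstr.lower())
--         flag |= (('/'+d) in pstr.lower())
--     for ext in extension_blacklist:
--         flag |= pstr.lower().endswith(ext)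
--     return not flag
-- ===== SOURCE B (Python) =====
-- file_blacklist = [
--         'makefile', 'copying', 'install-sh', 'configure',
--         'configure.in', 'makefile.in', 'readme', 'changelog',
--         'install', 'todo', 'aclocal.m4', 'authors', 'faq', 'howto',
--         'thanks', 'license', 'kconfig', 'kbuild',
--         ]
--
-- dir_blacklist = ['toolchain', 'tools']
--
-- extension_blacklist = [
--         '.bat', '.c', '.h', '.cpp', '.hpp', '.mak',
--         '.make', '.js', '.xml', '.html', '.htm', '.css', '.svn-base',
--         '.s', '.txt', '.in', '.asm', '.am', '.log', '.png', '.jpg',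
--         '.gif', '.bmp', '.conf', '.texi', '.plo', '.tex', '.man', '.8',
--         '.sgml', '.diff', '.patch', '.txt', '.pdf', '.class', '.jar',
--         ]
--
-- _file_set = frozenset(file_blacklist)
-- _ext_tuple = tuple(extension_blacklist)
--
-- def interesting_path(pstr):
--     # Tokenize the path once into its '/'-separated components; every
--     # blacklist test then becomes a purely component-local prefix/suffix/
--     # membership test -- no substring searching over the whole path at all.
--     # Correct because no blacklist entry contains a '/': an occurrence of
--     # 'd/' is exactly 'd' as a suffix of a non-final component, '/d' is
--     # 'd' as a prefix of a non-first component, and the name / extension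
--     # tests only ever see the final component.
--     comps = pstr.lower().split('/')
--     last = comps[-1]
--     bad = (last in _file_set
--            or last.endswith(_ext_tuple)
--            or any(c.startswith(d) for c in comps for d in dir_blacklist)
--            or any(c.endswith(d) for c in comps[:-1] for d in dir_blacklist))
--     return not bad
-- ===== Notes on version B (the rewrite author's own statement) =====
-- stated objective: faster
-- what changed: B tokenizes the lowered path once into its slash-separated components and replaces all of A's whole-string scans by component-local tests: the filename loop becomes a set lookup on the last component, the extension loop one endswith on the last component, and the three substring searches per directory entry become prefix/suffix tests on individual components (correct since no blacklist entry contains a slash).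
import Mathlib
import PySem

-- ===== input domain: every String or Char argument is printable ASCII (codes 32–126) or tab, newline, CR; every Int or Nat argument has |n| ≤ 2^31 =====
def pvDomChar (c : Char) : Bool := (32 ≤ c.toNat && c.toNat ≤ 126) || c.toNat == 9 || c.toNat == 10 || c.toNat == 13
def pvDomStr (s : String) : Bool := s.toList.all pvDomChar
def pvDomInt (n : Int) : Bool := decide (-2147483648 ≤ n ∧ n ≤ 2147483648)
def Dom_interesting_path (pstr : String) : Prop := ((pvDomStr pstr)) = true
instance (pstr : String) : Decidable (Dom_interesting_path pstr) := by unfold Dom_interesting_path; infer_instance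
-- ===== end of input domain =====

-- B splits the lowered path once into its '/'-separated components and tests every blacklist
-- entry component-locally instead of A's repeated whole-string scans (objective: faster; measured).

def file_blacklist : List String := [
        "makefile", "copying", "install-sh", "configure",
        "configure.in", "makefile.in", "readme", "changelog",
        "install", "todo", "aclocal.m4", "authors", "faq", "howto",
        "thanks", "license", "kconfig", "kbuild"]

def dir_blacklist : List String := ["toolchain", "tools"]

def extension_blacklist : List String := [
        ".bat", ".c", ".h", ".cpp", ".hpp", ".mak",
        ".make", ".js", ".xml", ".html", ".htm", ".css", ".svn-base",
        ".s", ".txt", ".in", ".asm", ".am", ".log", ".png", ".jpg",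
        ".gif", ".bmp", ".conf", ".texi", ".plo", ".tex", ".man", ".8",
        ".sgml", ".diff", ".patch", ".txt", ".pdf", ".class", ".jar"]

-- ===== PORT A =====
def interesting_path (pstr : String) : Bool :=
  let flag := false
  let flag := file_blacklist.foldl (fun flag f =>
    (flag || (PySem.Str.lower pstr == f)) ||
      PySem.Str.endswith (PySem.Str.lower pstr) ("/" ++ f)) flag
  let flag := dir_blacklist.foldl (fun flag d =>
    ((flag || PySem.Str.startswith (PySem.Str.lower pstr) d) ||
      PySem.Str.isIn (d ++ "/") (PySem.Str.lower pstr)) ||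
      PySem.Str.isIn ("/" ++ d) (PySem.Str.lower pstr)) flag
  let flag := extension_blacklist.foldl (fun flag ext =>
    flag || PySem.Str.endswith (PySem.Str.lower pstr) ext) flag
  !flag

-- ===== PORT B =====
-- the module-level frozenset built once in Source B
def pvFileSet : PySem.Set String := PySem.Set.ofList file_blacklist

def interesting_path_alt (pstr : String) : Bool :=
  let low := PySem.Str.lower pstr
  -- low.split('/'); the separator "/" is nonempty so split? is never none and .getD [] is never taken
  let comps := (PySem.Str.split? low "/").getD []
  -- comps[-1]; split always yields a nonempty list, so pyGet? is never none and .getD "" is never taken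
  let last := (PySem.List.pyGet? comps (-1)).getD ""
  -- comps[:-1]
  let parents := PySem.List.slice comps none (some (-1))
  !(PySem.Set.contains pvFileSet last ||
    extension_blacklist.any (fun ext => PySem.Str.endswith last ext) ||
    comps.any (fun c => dir_blacklist.any (fun d => PySem.Str.startswith c d)) ||
    parents.any (fun c => dir_blacklist.any (fun d => PySem.Str.endswith c d)))

-- ===== PRECONDITION & SPEC =====
def Spec_interesting_path (pstr : String) (out : Bool) : Prop := out = interesting_path_alt pstr
instance (pstr : String) (out : Bool) : Decidable (Spec_interesting_path pstr out) := by unfold Spec_interesting_path; infer_instance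

-- ===== CLAIM (what is proved, stated in full; the proofs are below) =====
def Claim_equal_interesting_path : Prop := ∀ (pstr : String), Dom_interesting_path pstr → Spec_interesting_path pstr (interesting_path pstr)

-- ===== LEMMAS AND PROOFS =====

-- a structural-recursion model of str.split('/') on the character list
def pvSpl : List Char → List (List Char)
  | [] => [[]]
  | c :: t => if c = '/' then [] :: pvSpl t
              else (c :: (pvSpl t).headI) :: (pvSpl t).tail

theorem pvSpl_ne_nil (l : List Char) : pvSpl l ≠ [] := by
  cases l with
  | nil => simp [pvSpl]
  | cons c t => by_cases h : c = '/' <;> simp [pvSpl, h]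

-- splitOn with the one-character separator '/' computes pvSpl
theorem pv_go_spec (l : List Char) : ∀ (fuel : Nat) (cur : List Char) (acc : List (List Char)),
    l.length ≤ fuel →
    PySem.Chars.splitOn.go ['/'] fuel l cur acc
      = acc.reverse ++ (cur.reverse ++ (pvSpl l).headI) :: (pvSpl l).tail := by
  induction l with
  | nil =>
    intro fuel cur acc _
    cases fuel <;> simp [PySem.Chars.splitOn.go, pvSpl]
  | cons c t ih =>
    intro fuel cur acc hlen
    cases fuel with
    | zero => simp at hlen
    | succ f =>
      simp only [List.length_cons] at hlen
      rw [PySem.Chars.splitOn.go.eq_def]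
      by_cases h : c = '/'
      · subst h
        simp only [List.isPrefixOf, Bool.and_eq_true, beq_self_eq_true,
          List.length_singleton, List.drop_succ_cons, List.drop_zero, and_self, if_pos]
        rw [ih f [] (cur.reverse :: acc) (by omega)]
        rcases hE : pvSpl t with _ | ⟨h0, t0⟩
        · exact absurd hE (pvSpl_ne_nil t)
        · simp [pvSpl, hE]
      · have hp : ['/'].isPrefixOf (c :: t) = false := by
          simp [List.isPrefixOf]; exact fun hc => absurd hc.symm h
        simp only [hp, Bool.false_eq_true, if_false]
        rw [ih f (c :: cur) acc (by omega)]
        simp [pvSpl, h]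

theorem pv_splitOn_eq (l : List Char) : PySem.Chars.splitOn l ['/'] = pvSpl l := by
  have h := pv_go_spec l (l.length + 1) [] [] (by omega)
  rcases hE : pvSpl l with _ | ⟨h0, t0⟩
  · exact absurd hE (pvSpl_ne_nil l)
  · rw [PySem.Chars.splitOn, h, hE]; simp

-- slash-free prefixes live in takeWhile (≠ '/')
theorem pv_prefix_takeWhile (d : List Char) : ∀ (l : List Char), '/' ∉ d →
    (d <+: l ↔ d <+: l.takeWhile (fun c => c != '/')) := by
  induction d with
  | nil => intro l _; simp
  | cons a d' ih =>
    intro l hd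
    have ha : a ≠ '/' := fun h => hd (h ▸ List.mem_cons_self)
    have hd' : '/' ∉ d' := fun h => hd (List.mem_cons_of_mem _ h)
    cases l with
    | nil => simp
    | cons b l' =>
      by_cases hb : b = '/'
      · subst hb
        simp only [List.takeWhile_cons, bne_self_eq_false, Bool.false_eq_true, if_false]
        constructor
        · intro h
          rcases List.cons_prefix_cons.mp h with ⟨rfl, _⟩
          exact absurd rfl ha
        · intro h; exact absurd (List.prefix_nil.mp h) (by simp)
      · have hbt : (b != '/') = true := by simpa using hb
        simp only [List.takeWhile_cons, hbt, if_true, List.cons_prefix_cons]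
        exact and_congr_right fun _ => ih l' hd'

theorem pvSpl_headI (l : List Char) : (pvSpl l).headI = l.takeWhile (fun c => c != '/') := by
  induction l with
  | nil => simp [pvSpl]
  | cons c t ih =>
    by_cases h : c = '/'
    · simp [pvSpl, h]
    · simp [pvSpl, h, ih]

-- appending one character to the input
theorem pvSpl_append_single (xs : List Char) (c : Char) :
    pvSpl (xs ++ [c]) = if c = '/' then pvSpl xs ++ [[]]
      else (pvSpl xs).dropLast ++ [(pvSpl xs).getLastD [] ++ [c]] := by
  induction xs with
  | nil =>
    by_cases h : c = '/' <;> simp [pvSpl, h]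
  | cons x xs ih =>
    by_cases hx : x = '/'
    · subst hx
      by_cases h : c = '/'
      · subst h; simp [pvSpl, ih]
      · rcases hE : pvSpl xs with _ | ⟨h0, t0⟩
        · exact absurd hE (pvSpl_ne_nil xs)
        · simp [pvSpl, h, ih, hE]
    · by_cases h : c = '/'
      · subst h
        rcases hE : pvSpl xs with _ | ⟨h0, t0⟩
        · exact absurd hE (pvSpl_ne_nil xs)
        · simp [pvSpl, hx, ih, hE]
      · rcases hE : pvSpl xs with _ | ⟨h0, t0⟩
        · exact absurd hE (pvSpl_ne_nil xs)
        · rcases t0 with _ | ⟨h1, t1⟩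
          · simp [pvSpl, hx, h, ih, hE]
          · simp [pvSpl, hx, h, ih, hE]

theorem pvSpl_reverse (l : List Char) :
    pvSpl l.reverse = ((pvSpl l).map List.reverse).reverse := by
  induction l with
  | nil => simp [pvSpl]
  | cons c t ih =>
    rw [List.reverse_cons, pvSpl_append_single, ih]
    by_cases h : c = '/'
    · simp [pvSpl, h]
    · rcases hE : pvSpl t with _ | ⟨h0, t0⟩
      · exact absurd hE (pvSpl_ne_nil t)
      · simp [pvSpl, h, hE]

-- the basename: the characters after the last '/', the whole string when there is none
def pvBasenameL (cs : List Char) : List Char :=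
  (cs.reverse.takeWhile (fun c => c != '/')).reverse

theorem pvSpl_getLastD (l : List Char) : (pvSpl l).getLastD [] = pvBasenameL l := by
  rcases List.eq_nil_or_concat (pvSpl l) with h | ⟨ys, z, h⟩
  · exact absurd h (pvSpl_ne_nil l)
  · have h2 := pvSpl_reverse l
    rw [h] at h2 ⊢
    simp only [List.concat_eq_append, List.map_append, List.map_cons, List.map_nil,
      List.reverse_append, List.reverse_cons, List.reverse_nil, List.nil_append,
      List.singleton_append] at h2
    have h3 := pvSpl_headI l.reverse
    rw [h2] at h3
    simp only [List.headI_cons] at h3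
    rw [List.concat_eq_append, List.getLastD_concat]
    unfold pvBasenameL
    rw [← h3, List.reverse_reverse]

-- the head of a nonempty dropWhile fails the predicate
theorem pv_dropWhile_cons_false {p : Char → Bool} {l tl : List Char} {c : Char}
    (h : l.dropWhile p = c :: tl) : p c = false := by
  induction l with
  | nil => simp at h
  | cons a t ih =>
    rw [List.dropWhile_cons] at h
    split at h
    · exact ih h
    · next hpa => cases h; simpa using hpa

-- r.takeWhile (≠ '/') picks out fr exactly when r is fr or r extends fr past a '/'
theorem pv_takeWhile_slash (r fr : List Char) (hfr : '/' ∉ fr) :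
    r.takeWhile (fun c => c != '/') = fr ↔ (r = fr ∨ fr ++ ['/'] <+: r) := by
  have hall : ∀ a ∈ fr, (fun c => c != '/') a = true := by
    intro a ha; simp; rintro rfl; exact hfr ha
  have htw : fr.takeWhile (fun c => c != '/') = fr := List.takeWhile_eq_self_iff.mpr hall
  constructor
  · intro h
    rcases hnil : r.dropWhile (fun c => c != '/') with _ | ⟨c, tl⟩
    · left
      have hsplit := List.takeWhile_append_dropWhile (p := fun c => c != '/') (l := r)
      rw [h, hnil] at hsplit; simpa using hsplit.symm
    · right
      have hc : c = '/' := by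
        have := pv_dropWhile_cons_false hnil
        by_contra hne; simp [hne] at this
      refine ⟨tl, ?_⟩
      have hsplit := List.takeWhile_append_dropWhile (p := fun c => c != '/') (l := r)
      rw [h, hnil, hc] at hsplit
      simpa using hsplit
  · rintro (rfl | ⟨rest, hrest⟩)
    · exact htw
    · subst hrest
      rw [List.append_assoc, List.takeWhile_append]
      simp [htw]

-- the filename test of A ('== f' or endswith '/'+f) is exactly 'basename = f'
theorem pv_file_hit (low f : List Char) (hf : '/' ∉ f) :
    ((low = f) ∨ ('/' :: f) <:+ low) ↔ pvBasenameL low = f := by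
  have h1 : ('/' :: f) <:+ low ↔ f.reverse ++ ['/'] <+: low.reverse := by
    rw [← List.reverse_prefix]; simp
  have h2 : low = f ↔ low.reverse = f.reverse := by
    constructor <;> intro h
    · rw [h]
    · simpa using congrArg List.reverse h
  have h3 : pvBasenameL low = f ↔ low.reverse.takeWhile (fun c => c != '/') = f.reverse := by
    unfold pvBasenameL
    constructor <;> intro h
    · simpa using congrArg List.reverse h
    · rw [h]; simp
  rw [h1, h2, h3, pv_takeWhile_slash]
  simpa using hf

-- slash-free suffixes live in the basename
theorem pv_suffix_basename (e l : List Char) (he : '/' ∉ e) :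
    e <:+ l ↔ e <:+ pvBasenameL l := by
  have he' : '/' ∉ e.reverse := by simpa using he
  constructor
  · intro h
    have h1 : e.reverse <+: l.reverse := List.reverse_prefix.mpr h
    have h2 := (pv_prefix_takeWhile e.reverse l.reverse he').mp h1
    unfold pvBasenameL
    exact List.reverse_prefix.mp (by simpa using h2)
  · intro h
    have h1 : e.reverse <+: (pvBasenameL l).reverse := List.reverse_prefix.mpr h
    unfold pvBasenameL at h1
    rw [List.reverse_reverse] at h1
    have h2 := (pv_prefix_takeWhile e.reverse l.reverse he').mpr h1
    exact List.reverse_prefix.mp h2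

-- A's startswith test = prefix of the first component
theorem pv_dir_start (d l : List Char) (hd : '/' ∉ d) :
    d <+: l ↔ d <+: (pvSpl l).headI := by
  rw [pvSpl_headI]; exact pv_prefix_takeWhile d l hd

-- A's '/'+d substring test = prefix of a later component
theorem pv_dir_after (d : List Char) (hd : '/' ∉ d) : ∀ (l : List Char),
    (('/' :: d) <:+: l ↔ ∃ c ∈ (pvSpl l).tail, d <+: c) := by
  intro l
  induction l with
  | nil => simp [pvSpl]
  | cons c t ih =>
    rw [List.infix_cons_iff]
    by_cases h : c = '/'
    · subst h
      have h1 : ('/' :: d) <+: ('/' :: t) ↔ d <+: t := by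
        simp [List.cons_prefix_cons]
      rcases hE : pvSpl t with _ | ⟨h0, t0⟩
      · exact absurd hE (pvSpl_ne_nil t)
      · have hh : d <+: t ↔ d <+: h0 := by
          have := pv_prefix_takeWhile d t hd
          rw [← pvSpl_headI, hE] at this
          simpa using this
        rw [hE] at ih
        simp only [pvSpl, hE, List.tail_cons, h1, ih, hh]
        simp
    · have h1 : ¬ ('/' :: d) <+: (c :: t) := by
        intro hp
        rcases List.cons_prefix_cons.mp hp with ⟨he, _⟩
        exact h he.symm
      rcases hE : pvSpl t with _ | ⟨h0, t0⟩
      · exact absurd hE (pvSpl_ne_nil t)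
      · rw [hE] at ih
        simp only [pvSpl, if_neg h, hE, List.tail_cons, ih]
        simp [h1]

-- A's d+'/' substring test = suffix of a non-final component
theorem pv_dir_before (d l : List Char) (hd : '/' ∉ d) :
    (d ++ ['/']) <:+: l ↔ ∃ c ∈ (pvSpl l).dropLast, d <:+ c := by
  have hd' : '/' ∉ d.reverse := by simpa using hd
  have h1 : (d ++ ['/']) <:+: l ↔ ('/' :: d.reverse) <:+: l.reverse := by
    rw [← List.reverse_infix]; simp
  rw [h1, pv_dir_after d.reverse hd' l.reverse, pvSpl_reverse, List.tail_reverse,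
    ← List.map_dropLast]
  constructor
  · rintro ⟨c, hc, hp⟩
    rcases List.mem_reverse.mp hc with hc'
    rcases List.mem_map.mp hc' with ⟨x, hx, rfl⟩
    exact ⟨x, hx, List.reverse_prefix.mp (by simpa using hp)⟩
  · rintro ⟨x, hx, hs⟩
    refine ⟨x.reverse, List.mem_reverse.mpr (List.mem_map.mpr ⟨x, hx, rfl⟩), ?_⟩
    exact List.reverse_prefix.mpr hs

-- A's 'flag |= …' loops are folds of a disjunction: they compute b || l.any g
theorem pv_foldl_or {α : Type} (g : α → Bool) (b : Bool) (l : List α) :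
    l.foldl (fun acc x => acc || g x) b = (b || l.any g) := by
  induction l generalizing b with
  | nil => simp
  | cons a t ih =>
    rw [List.foldl_cons, ih, List.any_cons]
    cases b <;> cases g a <;> simp

theorem pv_foldl_or2 {α : Type} (p q : α → Bool) (b : Bool) (l : List α) :
    l.foldl (fun acc x => (acc || p x) || q x) b = (b || l.any (fun x => p x || q x)) := by
  have h : l.foldl (fun acc x => (acc || p x) || q x) b
      = l.foldl (fun acc x => acc || (p x || q x)) b := by
    simp [Bool.or_assoc]
  rw [h, pv_foldl_or]

theorem pv_foldl_or3 {α : Type} (p q r : α → Bool) (b : Bool) (l : List α) :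
    l.foldl (fun acc x => ((acc || p x) || q x) || r x) b
      = (b || l.any (fun x => (p x || q x) || r x)) := by
  have h : l.foldl (fun acc x => ((acc || p x) || q x) || r x) b
      = l.foldl (fun acc x => acc || ((p x || q x) || r x)) b := by
    simp [Bool.or_assoc]
  rw [h, pv_foldl_or]


-- B-side plumbing: comps[-1] and comps[:-1]
theorem pv_pyGet_last (xs : List String) (h : xs ≠ []) :
    PySem.List.pyGet? xs (-1) = some (xs.getLastD "") := by
  have hl : 1 ≤ xs.length := Nat.succ_le_of_lt (List.length_pos_iff.mpr h)
  simp [PySem.List.pyGet?, PySem.List.pyIdx?, hl, List.getLast?_eq_getElem?,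
    List.getLastD_eq_getLast?]
  rw [List.getElem?_eq_getElem (by omega)]
  simp

theorem pv_slice_dropLast (l : List String) :
    PySem.List.slice l none (some (-1)) = l.dropLast := by
  simp [PySem.List.slice]
  exact List.dropLast_eq_take.symm

theorem pv_getLastD_toList (xs : List String) (h : xs ≠ []) :
    (xs.getLastD "").toList = (xs.map String.toList).getLastD [] := by
  rcases List.eq_nil_or_concat xs with rfl | ⟨ys, z, rfl⟩
  · exact absurd rfl h
  · simp

-- the split? call of Source B yields exactly the pvSpl components
theorem pv_split_some (low : String) :
    ∃ comps, PySem.Str.split? low "/" = some comps ∧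
      comps.map String.toList = pvSpl low.toList := by
  have hb := PySem.Str.split?_map low "/"
  rw [show ("/" : String).toList = ['/'] from rfl] at hb
  rw [PySem.Chars.split?] at hb
  simp only [List.isEmpty_cons, Bool.false_eq_true, if_false, pv_splitOn_eq] at hb
  cases hsp : PySem.Str.split? low "/" with
  | none => rw [hsp] at hb; simp at hb
  | some comps =>
    rw [hsp] at hb
    simp only [Option.map_some, Option.some.injEq] at hb
    exact ⟨comps, rfl, hb⟩

-- entries of the blacklists contain no '/'
theorem pv_file_noslash : ∀ f ∈ file_blacklist, '/' ∉ f.toList := by decide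
theorem pv_dir_noslash : ∀ d ∈ dir_blacklist, '/' ∉ d.toList := by decide
theorem pv_ext_noslash : ∀ e ∈ extension_blacklist, '/' ∉ e.toList := by decide

-- A's filename loop = one membership test of the basename in the file set
theorem pv_file_any (low lastS : String) (hlast : lastS.toList = pvBasenameL low.toList) :
    file_blacklist.any (fun f => (low == f) || PySem.Str.endswith low ("/" ++ f))
      = PySem.Set.contains pvFileSet lastS := by
  have hset : pvFileSet = file_blacklist := by decide
  have hiff : ∀ f ∈ file_blacklist,
      (((low == f) || PySem.Str.endswith low ("/" ++ f)) = true ↔ (lastS == f) = true) := by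
    intro f hf
    have hfs : ('/' : Char) ∉ f.toList := pv_file_noslash f hf
    simp only [Bool.or_eq_true, beq_iff_eq, PySem.Str.endswith_eq, PySem.Chars.endswith_iff]
    have htl : (("/" : String) ++ f).toList = '/' :: f.toList := by simp
    rw [htl]
    have hcore := pv_file_hit low.toList f.toList hfs
    constructor
    · rintro (rfl | h)
      · refine String.ext ?_
        rw [hlast]; exact hcore.mp (Or.inl rfl)
      · refine String.ext ?_
        rw [hlast]; exact hcore.mp (Or.inr h)
    · intro h
      have hb : pvBasenameL low.toList = f.toList := by rw [← hlast, h]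
      rcases hcore.mpr hb with h1 | h2
      · exact Or.inl (String.ext h1)
      · exact Or.inr h2
  rw [hset, PySem.Set.contains, List.contains_eq_any_beq, Bool.eq_iff_iff]
  simp only [List.any_eq_true]
  exact ⟨fun ⟨f, hf, h⟩ => ⟨f, hf, (hiff f hf).mp h⟩,
         fun ⟨f, hf, h⟩ => ⟨f, hf, (hiff f hf).mpr h⟩⟩

-- A's extension loop over the whole path = the same loop over the basename
theorem pv_ext_any (low lastS : String) (hlast : lastS.toList = pvBasenameL low.toList) :
    extension_blacklist.any (fun ext => PySem.Str.endswith low ext)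
      = extension_blacklist.any (fun ext => PySem.Str.endswith lastS ext) := by
  rw [Bool.eq_iff_iff]
  simp only [List.any_eq_true, PySem.Str.endswith_eq, PySem.Chars.endswith_iff]
  constructor
  · rintro ⟨e, he, h⟩
    refine ⟨e, he, ?_⟩
    rw [hlast]
    exact (pv_suffix_basename e.toList low.toList (pv_ext_noslash e he)).mp h
  · rintro ⟨e, he, h⟩
    rw [hlast] at h
    exact ⟨e, he, (pv_suffix_basename e.toList low.toList (pv_ext_noslash e he)).mpr h⟩

-- A's directory substring loop = component-local prefix/suffix tests
theorem pv_dir_group (low : String) (comps : List String)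
    (hmap : comps.map String.toList = pvSpl low.toList) :
    dir_blacklist.any (fun d =>
        (PySem.Str.startswith low d || PySem.Str.isIn (d ++ "/") low) ||
          PySem.Str.isIn ("/" ++ d) low)
      = (comps.any (fun c => dir_blacklist.any (fun d => PySem.Str.startswith c d)) ||
         comps.dropLast.any (fun c => dir_blacklist.any (fun d => PySem.Str.endswith c d))) := by
  have hmapD : comps.dropLast.map String.toList = (pvSpl low.toList).dropLast := by
    rw [← hmap]; exact List.map_dropLast
  have hS : pvSpl low.toList = (pvSpl low.toList).headI :: (pvSpl low.toList).tail := by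
    rcases hE : pvSpl low.toList with _ | ⟨h0, t0⟩
    · exact absurd hE (pvSpl_ne_nil low.toList)
    · simp
  rw [Bool.eq_iff_iff]
  simp only [List.any_eq_true, Bool.or_eq_true, PySem.Str.startswith_eq,
    PySem.Chars.startswith_iff, PySem.Str.endswith_eq, PySem.Chars.endswith_iff,
    PySem.Str.isIn_iff_infix, String.toList_append]
  have htl1 : ∀ d : String, (d.toList ++ ("/" : String).toList) = d.toList ++ ['/'] := by
    intro d; rfl
  have htl2 : ∀ d : String, (("/" : String).toList ++ d.toList) = '/' :: d.toList := by
    intro d; rfl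
  have hmem : ∀ (P : List Char → Prop), (∃ c ∈ comps, P c.toList) ↔ (∃ x ∈ pvSpl low.toList, P x) := by
    intro P
    constructor
    · rintro ⟨c, hc, hP⟩
      exact ⟨c.toList, by rw [← hmap]; exact List.mem_map_of_mem hc, hP⟩
    · rintro ⟨x, hx, hP⟩
      rw [← hmap] at hx
      rcases List.mem_map.mp hx with ⟨c, hc, rfl⟩
      exact ⟨c, hc, hP⟩
  have hmemD : ∀ (P : List Char → Prop),
      (∃ c ∈ comps.dropLast, P c.toList) ↔ (∃ x ∈ (pvSpl low.toList).dropLast, P x) := by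
    intro P
    constructor
    · rintro ⟨c, hc, hP⟩
      exact ⟨c.toList, by rw [← hmapD]; exact List.mem_map_of_mem hc, hP⟩
    · rintro ⟨x, hx, hP⟩
      rw [← hmapD] at hx
      rcases List.mem_map.mp hx with ⟨c, hc, rfl⟩
      exact ⟨c, hc, hP⟩
  have hmemS := hmem (fun y => ∃ x ∈ dir_blacklist, x.toList <+: y)
  have hmemE := hmemD (fun y => ∃ x ∈ dir_blacklist, x.toList <:+ y)
  constructor
  · rintro ⟨d, hd, hcase⟩
    have hsf : ('/' : Char) ∉ d.toList := pv_dir_noslash d hd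
    rcases hcase with (hstart | hbefore) | hafter
    · left
      refine hmemS.mpr ⟨(pvSpl low.toList).headI, ?_, d, hd, ?_⟩
      · rw [hS]; exact List.mem_cons_self
      · exact (pv_dir_start d.toList low.toList hsf).mp hstart
    · right
      rw [htl1 d] at hbefore
      rcases (pv_dir_before d.toList low.toList hsf).mp hbefore with ⟨x, hx, hsuf⟩
      exact hmemE.mpr ⟨x, hx, d, hd, hsuf⟩
    · left
      rw [htl2 d] at hafter
      rcases (pv_dir_after d.toList hsf low.toList).mp hafter with ⟨x, hx, hpre⟩
      refine hmemS.mpr ⟨x, ?_, d, hd, hpre⟩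
      rw [hS]; exact List.mem_cons_of_mem _ hx
  · rintro (hcomp | hpar)
    · rcases hmemS.mp hcomp with ⟨x, hx, d, hd, hpre⟩
      have hsf : ('/' : Char) ∉ d.toList := pv_dir_noslash d hd
      refine ⟨d, hd, ?_⟩
      rw [hS] at hx
      rcases List.mem_cons.mp hx with rfl | hxt
      · exact Or.inl (Or.inl ((pv_dir_start d.toList low.toList hsf).mpr hpre))
      · right
        rw [htl2 d]
        exact (pv_dir_after d.toList hsf low.toList).mpr ⟨x, hxt, hpre⟩
    · rcases hmemE.mp hpar with ⟨x, hx, d, hd, hsuf⟩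
      have hsf : ('/' : Char) ∉ d.toList := pv_dir_noslash d hd
      refine ⟨d, hd, Or.inl (Or.inr ?_)⟩
      rw [htl1 d]
      exact (pv_dir_before d.toList low.toList hsf).mpr ⟨x, hx, hsuf⟩

theorem pv_bool_shuffle (b1 b2 b3 b4 : Bool) :
    (!((b1 || (b3 || b4)) || b2)) = (!(((b1 || b2) || b3) || b4)) := by
  cases b1 <;> cases b2 <;> cases b3 <;> cases b4 <;> rfl

-- ===== VERDICT (by name: the statement is the Claim_ definition above) =====
theorem interesting_path_spec : Claim_equal_interesting_path := by
  intro pstr _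
  show interesting_path pstr = interesting_path_alt pstr
  rcases pv_split_some (PySem.Str.lower pstr) with ⟨comps, hsp, hmap⟩
  have hcne : comps ≠ [] := by
    intro h
    apply pvSpl_ne_nil (PySem.Str.lower pstr).toList
    rw [← hmap, h]
    rfl
  have hlast : ((PySem.List.pyGet? comps (-1)).getD "").toList
      = pvBasenameL (PySem.Str.lower pstr).toList := by
    rw [pv_pyGet_last comps hcne]
    simp only [Option.getD_some]
    rw [pv_getLastD_toList comps hcne, hmap, pvSpl_getLastD]
  rw [interesting_path, interesting_path_alt]
  simp only [pv_foldl_or, pv_foldl_or2, pv_foldl_or3, Bool.false_or, hsp,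
    Option.getD_some, pv_slice_dropLast]
  rw [pv_file_any _ _ hlast, pv_ext_any _ _ hlast, pv_dir_group _ comps hmap]
  exact pv_bool_shuffle _ _ _ _
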